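-- pv_equiv track=rewrite | github.com/BapanmLdL/Python-Project | Stack_Queue_Deque/stack_problems.py | max_of_min_for_everywindow_naive
-- ===== SOURCE A (Python) =====
-- import math
--
-- def max_of_min_for_everywindow_naive(arr):
--
--     result = [-math.inf] * len(arr)
--
--     for i in range(len(arr)):
--
--         for j in range(i, len(arr)):
--
--             length = j - i + 1
--             temp = math.inf
--
--             for k in range(i, j+1):
--
--                 temp = min(temp, arr[k])
--
--             result[length-1] = max(result[length-1], temp)
--
--     return result
-- ===== SOURCE B (Python) =====
-- import math
--
-- def max_of_min_for_everywindow_naive(arr):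
--     # O(n^2): maintain a running minimum while extending the window right,
--     # instead of re-scanning each window (A's extra inner loop disappears).
--     n = len(arr)
--     result = [-math.inf] * n
--     for i in range(n):
--         m = math.inf
--         for j in range(i, n):
--             m = min(m, arr[j])
--             length = j - i
--             result[length] = max(result[length], m)
--     return result
-- ===== Notes on version B (the rewrite author's own statement) =====
-- stated objective: faster
-- what changed: B maintains a running minimum while extending each window to the right, removing A's innermost re-scan of every window.
import Mathlib
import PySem

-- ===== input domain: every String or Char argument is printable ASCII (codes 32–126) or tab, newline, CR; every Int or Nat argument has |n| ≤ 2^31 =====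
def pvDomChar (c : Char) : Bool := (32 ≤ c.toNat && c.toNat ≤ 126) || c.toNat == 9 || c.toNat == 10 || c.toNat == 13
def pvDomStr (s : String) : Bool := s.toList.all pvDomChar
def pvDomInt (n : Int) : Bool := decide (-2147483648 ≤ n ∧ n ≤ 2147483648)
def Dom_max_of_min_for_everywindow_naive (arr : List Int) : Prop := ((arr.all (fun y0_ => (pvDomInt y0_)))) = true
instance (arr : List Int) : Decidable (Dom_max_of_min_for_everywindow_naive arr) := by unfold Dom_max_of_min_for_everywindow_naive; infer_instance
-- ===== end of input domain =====

-- B replaces A's innermost window re-scan by a running minimum (O(n^2) instead of O(n^3)); same return value.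

-- ===== PORT A =====
-- The sentinels math.inf / -math.inf are modelled by `none` of an Option Int accumulator:
-- pyMin is Python's min with a running minimum started at +inf, pyMax is max started at -inf.
def pyMin : Option Int → Int → Option Int
  | none, x => some x
  | some a, x => some (min a x)

def pyMax : Option Int → Option Int → Option Int
  | none, x => x
  | some a, none => some a
  | some a, some x => some (max a x)

-- every length has at least one window, so every slot is `some` on return and the
-- `.getD 0` default is never read (for n = 0 the list is empty).
def max_of_min_for_everywindow_naive (arr : List Int) : List Int :=
  let n : Int := arr.length
  let result : List (Option Int) := List.replicate arr.length none
  let result :=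
    (PySem.List.pyRange 0 n 1).foldl (fun result i =>
      (PySem.List.pyRange i n 1).foldl (fun result j =>
        let len := j - i + 1
        let temp :=
          (PySem.List.pyRange i (j+1) 1).foldl
            (fun temp k => pyMin temp (PySem.List.pyGetD arr k 0)) none
        PySem.List.pySetD result (len - 1)
          (pyMax (PySem.List.pyGetD result (len - 1) none) temp)) result) result
  result.map (fun o => o.getD 0)

-- ===== PORT B =====
def max_of_min_for_everywindow_naive_alt (arr : List Int) : List Int :=
  let n : Int := arr.length
  let result : List (Option Int) := List.replicate arr.length none
  let result :=
    (PySem.List.pyRange 0 n 1).foldl (fun result i =>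
      ((PySem.List.pyRange i n 1).foldl (fun (st : Option Int × List (Option Int)) j =>
        let m := pyMin st.1 (PySem.List.pyGetD arr j 0)
        let len := j - i
        (m, PySem.List.pySetD st.2 len
              (pyMax (PySem.List.pyGetD st.2 len none) m))) (none, result)).2) result
  result.map (fun o => o.getD 0)

-- ===== PRECONDITION & SPEC =====
def Spec_max_of_min_for_everywindow_naive (arr : List Int) (out : List Int) : Prop := out = max_of_min_for_everywindow_naive_alt arr
instance (arr : List Int) (out : List Int) : Decidable (Spec_max_of_min_for_everywindow_naive arr out) := by unfold Spec_max_of_min_for_everywindow_naive; infer_instance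

-- ===== CLAIM (what is proved, stated in full; the proofs are below) =====
def Claim_equal_max_of_min_for_everywindow_naive : Prop := ∀ (arr : List Int), Dom_max_of_min_for_everywindow_naive arr → Spec_max_of_min_for_everywindow_naive arr (max_of_min_for_everywindow_naive arr)

-- ===== LEMMAS AND PROOFS =====

-- A's step for the j-loop (result only) and B's step (running min × result).
def stepA (arr : List Int) (i : Int) (result : List (Option Int)) (j : Int) : List (Option Int) :=
  let len := j - i + 1
  let temp :=
    (PySem.List.pyRange i (j+1) 1).foldl
      (fun temp k => pyMin temp (PySem.List.pyGetD arr k 0)) none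
  PySem.List.pySetD result (len - 1)
    (pyMax (PySem.List.pyGetD result (len - 1) none) temp)

def stepB (arr : List Int) (i : Int) (st : Option Int × List (Option Int)) (j : Int) :
    Option Int × List (Option Int) :=
  let m := pyMin st.1 (PySem.List.pyGetD arr j 0)
  let len := j - i
  (m, PySem.List.pySetD st.2 len (pyMax (PySem.List.pyGetD st.2 len none) m))

-- Inner loops agree: if B's running minimum equals A's fold over the already-consumed
-- range [i, lo), then folding the remaining range [lo, n) gives the same result list.
theorem inner_eq (arr : List Int) (i n : Int) :
    ∀ (lo : Int), i ≤ lo →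
    ∀ (res : List (Option Int)) (acc : Option Int),
      acc = (PySem.List.pyRange i lo 1).foldl
              (fun t k => pyMin t (PySem.List.pyGetD arr k 0)) none →
      (PySem.List.pyRange lo n 1).foldl (stepA arr i) res
        = ((PySem.List.pyRange lo n 1).foldl (stepB arr i) (acc, res)).2 := by
  intro lo
  by_cases hlt : lo < n
  · have hterm : (n - (lo + 1)).toNat < (n - lo).toNat := by omega
    intro hi res acc hacc
    rw [PySem.List.pyRange_one_cons hlt]
    simp only [List.foldl_cons]
    have hstep : stepA arr i res lo = (stepB arr i (acc, res) lo).2 := by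
      simp only [stepA, stepB, hacc]
      rw [PySem.List.pyRange_one_succ_right hi, List.foldl_append]
      have h1 : lo - i + 1 - 1 = lo - i := by omega
      simp [h1]
    rw [hstep]
    exact inner_eq arr i n (lo + 1) (by omega) (stepB arr i (acc, res) lo).2
      (stepB arr i (acc, res) lo).1
      (by rw [PySem.List.pyRange_one_succ_right hi, List.foldl_append, ← hacc]; simp [stepB])
  · intro _ res acc _
    rw [PySem.List.pyRange_one_eq_nil (by omega : n ≤ lo)]
    simp
termination_by lo => (n - lo).toNat

-- ===== VERDICT (by name: the statement is the Claim_ definition above) =====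
theorem max_of_min_for_everywindow_naive_spec : Claim_equal_max_of_min_for_everywindow_naive := by
  intro arr _
  unfold Spec_max_of_min_for_everywindow_naive
  unfold max_of_min_for_everywindow_naive max_of_min_for_everywindow_naive_alt
  exact congrArg (List.map (fun o => o.getD 0))
    (PySem.List.foldl_congr_mem _ _ _ _ (fun res i _ =>
      inner_eq arr i (arr.length : Int) i (le_refl i) res none
        (by rw [PySem.List.pyRange_one_eq_nil (le_refl i)]; rfl)))
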